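-- pv_equiv track=rewrite | github.com/kuntito/LeetcodeGrind | grind__active/234 (minimum number of keypresses)/234a.py | getCharMap
-- ===== SOURCE A (Python) =====
-- def getCharMap(chars):
--     charMap = {}
--
--     count = 0
--     for ch in chars:
--         if ch not in charMap:
--             count += 1
--
--             if count <= 9:
--                 strokes = 1
--             elif count <= 18:
--                 strokes = 2
--             else:
--                 strokes = 3
--
--             charMap[ch] = strokes
--
--     return charMap
-- ===== SOURCE B (Python) =====
-- def getCharMap(chars):
--     # dedup via a set, recovering first-appearance order by sorting on first index
--     ordered = sorted(set(chars), key=chars.index)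
--     charMap = {}
--     stroke = 0
--     while ordered:
--         stroke = min(stroke + 1, 3)
--         for ch in ordered[:9]:
--             charMap[ch] = stroke
--         ordered = ordered[9:]
--     return charMap
-- ===== Notes on version B (the rewrite author's own statement) =====
-- stated objective: alternative
-- what changed: B deduplicates via a set and recovers first-appearance order by sorting on the first-occurrence index, then stamps stroke values group-wise: it slices the ordered list into chunks of nine and assigns each whole chunk one capped stroke counter value, instead of A's single pass with a membership guard, a running count and a three-way if/elif/else cascade.
import Mathlib
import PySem

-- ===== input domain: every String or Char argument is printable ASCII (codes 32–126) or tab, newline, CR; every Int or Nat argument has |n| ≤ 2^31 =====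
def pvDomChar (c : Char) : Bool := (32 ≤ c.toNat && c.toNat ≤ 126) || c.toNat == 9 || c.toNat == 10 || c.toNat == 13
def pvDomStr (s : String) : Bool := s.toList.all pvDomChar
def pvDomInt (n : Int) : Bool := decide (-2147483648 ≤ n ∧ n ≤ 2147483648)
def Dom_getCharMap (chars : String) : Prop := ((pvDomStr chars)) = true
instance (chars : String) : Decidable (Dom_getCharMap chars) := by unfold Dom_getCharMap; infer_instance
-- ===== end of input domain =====

-- B deduplicates with set + sort by first-occurrence index and stamps strokes chunk-of-nine-wise
-- with a capped counter; an alternative decomposition, same values on every input.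

-- ===== PORT A =====
-- one loop step of A: membership guard, running counter, if/elif/else cascade, dict append
def getCharMapStep (st : List (String × Int) × Int) (ch : Char) : List (String × Int) × Int :=
  let s := String.ofList [ch]
  if (st.1.map Prod.fst).contains s then st
  else
    let count := st.2 + 1
    let strokes : Int := if count ≤ 9 then 1 else if count ≤ 18 then 2 else 3
    (st.1 ++ [(s, strokes)], count)   -- dict assignment on a new key appends

def getCharMap (chars : String) : List (String × Int) :=
  (chars.toList.foldl getCharMapStep ([], 0)).1

-- ===== PORT B =====
-- the while loop of B: stamp the first nine of `rest` with the capped stroke counter, recurse on the rest.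
-- rest[:9] / rest[9:] are ported as take/drop, exact for these nonnegative bounds
-- (PySem.List.slice_to_natCast / slice_from_natCast).
def getCharMapChunks (m : PySem.Dict String Int) (stroke : Int) (rest : List Char) :
    PySem.Dict String Int :=
  if h : rest = [] then m
  else
    let s := min (stroke + 1) 3
    getCharMapChunks ((rest.take 9).foldl (fun d ch => d.insert (String.ofList [ch]) s) m) s
      (rest.drop 9)
termination_by rest.length
decreasing_by
  have : rest.length ≠ 0 := fun hl => h (List.length_eq_zero_iff.mp hl)
  simp [List.length_drop]; omega

-- sorted(set(chars), key=chars.index): exact port — the key is injective on the set's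
-- distinct elements (distinct chars have distinct first indices), so no tie depends on set order.
def getCharMap_alt (chars : String) : List (String × Int) :=
  (getCharMapChunks PySem.Dict.empty 0
    (PySem.List.sorted (PySem.Set.ofList chars.toList)
      (fun c => (PySem.List.index? chars.toList c).getD 0) false)).items

-- ===== PRECONDITION & SPEC =====
def Spec_getCharMap (chars : String) (out : List (String × Int)) : Prop := out = getCharMap_alt chars
instance (chars : String) (out : List (String × Int)) : Decidable (Spec_getCharMap chars out) := by unfold Spec_getCharMap; infer_instance

-- ===== CLAIM (what is proved, stated in full; the proofs are below) =====
def Claim_equal_getCharMap : Prop := ∀ (chars : String), Dom_getCharMap chars → Spec_getCharMap chars (getCharMap chars)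

-- ===== LEMMAS AND PROOFS =====

-- the common normal form both ports reduce to: one row per distinct char, strokes by ninth
def getCharMapRow (p : Int × Char) : String × Int :=
  (String.ofList [p.2], min (PySem.Int.floordiv p.1 9 + 1) 3)

-- ---- A-side: A's fold produces the rows of the first-appearance dedup ----

theorem getCharMap_keys (u : List Char) : ∀ (s : Int),
    ((PySem.List.enumerate u s).map getCharMapRow).map Prod.fst = u.map (fun c => String.ofList [c]) := by
  induction u with
  | nil => intro s; simp [PySem.List.enumerate]
  | cons c cs ih =>
    intro s
    rw [PySem.List.enumerate_cons]
    simp [getCharMapRow, ih (s + 1)]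

theorem getCharMap_mem_keys (u : List Char) (c : Char) :
    (((PySem.List.enumerate u 0).map getCharMapRow).map Prod.fst).contains (String.ofList [c]) = true ↔ c ∈ u := by
  rw [getCharMap_keys u 0]
  simp only [List.contains_iff_mem, List.mem_map]
  constructor
  · rintro ⟨x, hx, he⟩
    have hxc : x = c := by
      have := congrArg String.toList he
      simpa using this
    simpa [hxc] using hx
  · exact fun h => ⟨c, h, rfl⟩

theorem getCharMap_invariant (l u : List Char) :
    l.foldl getCharMapStep (((PySem.List.enumerate u).map getCharMapRow), (u.length : Int))
      = (((PySem.List.enumerate (l.foldl PySem.Set.add u)).map getCharMapRow),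
         ((l.foldl PySem.Set.add u).length : Int)) := by
  induction l generalizing u with
  | nil => simp
  | cons c cs ih =>
    simp only [List.foldl_cons]
    by_cases hc : c ∈ u
    · have hadd : PySem.Set.add u c = u := by
        simp [PySem.Set.add, PySem.Set.contains, hc]
      have ht : (((PySem.List.enumerate u 0).map getCharMapRow).map Prod.fst).contains (String.ofList [c]) = true :=
        (getCharMap_mem_keys u c).mpr hc
      have hstep : getCharMapStep (((PySem.List.enumerate u).map getCharMapRow), (u.length : Int)) c
          = (((PySem.List.enumerate u).map getCharMapRow), (u.length : Int)) := by
        simp only [getCharMapStep] at ht ⊢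
        rw [ht]
        simp
      rw [hstep, hadd, ih]
    · have hadd : PySem.Set.add u c = u ++ [c] := by
        simp [PySem.Set.add, PySem.Set.contains, hc]
      have hmem : (((PySem.List.enumerate u).map getCharMapRow).map Prod.fst).contains (String.ofList [c]) = false := by
        by_contra h
        exact hc ((getCharMap_mem_keys u c).mp (by simpa using h))
      have hstep : getCharMapStep (((PySem.List.enumerate u).map getCharMapRow), (u.length : Int)) c
          = (((PySem.List.enumerate (u ++ [c])).map getCharMapRow), ((u ++ [c]).length : Int)) := by
        simp only [getCharMapStep, hmem, Bool.false_eq_true, if_false]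
        rw [PySem.List.enumerate_append]
        simp [PySem.List.enumerate, getCharMapRow]
        omega
      rw [hstep, hadd, ih]

theorem getCharMap_eq_rows (chars : String) :
    getCharMap chars
      = (PySem.List.enumerate (PySem.Set.ofList chars.toList) 0).map getCharMapRow := by
  unfold getCharMap
  rw [PySem.Set.ofList_eq_foldl]
  have := getCharMap_invariant chars.toList []
  simpa using congrArg Prod.fst this

theorem foldl_add_filter (xs : List Char) : ∀ (acc : List Char),
    xs.foldl PySem.Set.add acc
      = acc ++ (PySem.Set.ofList xs).filter (fun y => !(PySem.Set.contains acc y)) := by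
  induction xs with
  | nil => intro acc; simp [PySem.Set.ofList, PySem.Set.empty]
  | cons x xs ih =>
    intro acc
    have hof : PySem.Set.ofList (x :: xs)
        = [x] ++ (PySem.Set.ofList xs).filter (fun y => !(PySem.Set.contains [x] y)) := by
      show List.foldl PySem.Set.add PySem.Set.empty (x :: xs) = _
      rw [List.foldl_cons]
      have : PySem.Set.add PySem.Set.empty x = [x] := by
        simp [PySem.Set.add, PySem.Set.empty, PySem.Set.contains]
      rw [this, ih [x]]
    rw [List.foldl_cons, ih (PySem.Set.add acc x), hof]
    by_cases hx : x ∈ acc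
    · have hadd : PySem.Set.add acc x = acc := by
        simp [PySem.Set.add, PySem.Set.contains, hx]
      rw [hadd, List.filter_append, List.filter_filter]
      have hx1 : List.filter (fun y => !PySem.Set.contains acc y) [x] = [] := by
        simp [PySem.Set.contains, hx]
      rw [hx1, List.nil_append]
      congr 1
      apply List.filter_congr
      intro y _
      by_cases hyx : y = x
      · subst hyx; simp [PySem.Set.contains, hx]
      · simp [PySem.Set.contains, hyx]
    · have hadd : PySem.Set.add acc x = acc ++ [x] := by
        simp [PySem.Set.add, PySem.Set.contains, hx]
      rw [hadd, List.append_assoc, List.filter_append, List.filter_filter]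
      have hx1 : List.filter (fun y => !PySem.Set.contains acc y) [x] = [x] := by
        simp [PySem.Set.contains, hx]
      rw [hx1]
      congr 2
      apply List.filter_congr
      intro y _
      simp [PySem.Set.contains, List.mem_append]

theorem ofList_cons (x : Char) (xs : List Char) :
    PySem.Set.ofList (x :: xs) = x :: (PySem.Set.ofList xs).filter (fun y => !(y == x)) := by
  show List.foldl PySem.Set.add PySem.Set.empty (x :: xs) = _
  rw [List.foldl_cons]
  have h1 : PySem.Set.add PySem.Set.empty x = [x] := by
    simp [PySem.Set.add, PySem.Set.empty, PySem.Set.contains]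
  rw [h1, foldl_add_filter]
  simp only [List.singleton_append, List.cons.injEq, true_and]
  apply List.filter_congr
  intro y _
  simp [PySem.Set.contains]
  rw [Bool.eq_iff_iff]; simp

theorem pairwise_idx (l : List Char) :
    (PySem.Set.ofList l).Pairwise
      (fun a b => (PySem.List.index? l a).getD 0 < (PySem.List.index? l b).getD 0) := by
  induction l with
  | nil => simp [PySem.Set.ofList, PySem.Set.empty]
  | cons x xs ih =>
    rw [ofList_cons]
    constructor
    · intro b hb
      have hbx : b ≠ x := by
        have := List.of_mem_filter hb
        simpa using this
      have hbmem : b ∈ xs := by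
        have := (PySem.Set.mem_ofList xs b).mp (List.mem_of_mem_filter hb)
        exact this
      rw [PySem.List.index?_cons_self]
      rw [PySem.List.index?_cons_of_ne xs (fun h => hbx h.symm)]
      obtain ⟨k, hk⟩ := Option.isSome_iff_exists.mp ((PySem.List.index?_isSome_iff xs b).mpr hbmem)
      rw [hk]
      simp
    · refine List.Pairwise.imp_of_mem ?_ (List.Pairwise.filter _ ih)
      intro a b ha hb hlt
      have hax : a ≠ x := by simpa using List.of_mem_filter ha
      have hbx : b ≠ x := by simpa using List.of_mem_filter hb
      have ham : a ∈ xs := (PySem.Set.mem_ofList xs a).mp (List.mem_of_mem_filter ha)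
      have hbm : b ∈ xs := (PySem.Set.mem_ofList xs b).mp (List.mem_of_mem_filter hb)
      rw [PySem.List.index?_cons_of_ne xs (fun h => hax h.symm),
          PySem.List.index?_cons_of_ne xs (fun h => hbx h.symm)]
      obtain ⟨ka, hka⟩ := Option.isSome_iff_exists.mp ((PySem.List.index?_isSome_iff xs a).mpr ham)
      obtain ⟨kb, hkb⟩ := Option.isSome_iff_exists.mp ((PySem.List.index?_isSome_iff xs b).mpr hbm)
      rw [hka, hkb] at hlt ⊢
      simpa using hlt

theorem sort_eq_ofList (l : List Char) :
    PySem.List.sorted (PySem.Set.ofList l) (fun c => (PySem.List.index? l c).getD 0) false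
      = PySem.Set.ofList l :=
  PySem.List.sorted_eq_of_perm_of_pairwise_lt _ _ _ (List.Perm.refl _) (pairwise_idx l)

theorem strOfSingle_inj : Function.Injective (fun c : Char => String.ofList [c]) := by
  intro a b h
  have := congrArg String.toList h
  simpa using this

theorem contains_foldl_insert (l : List Char) : ∀ (d : PySem.Dict String Int) (s : Int) (x : String),
    ((l.foldl (fun d ch => d.insert (String.ofList [ch]) s) d).contains x)
      = (d.contains x || l.any (fun ch => x == String.ofList [ch])) := by
  induction l with
  | nil => simp
  | cons c t ih =>
    intro d s x
    rw [List.foldl_cons, ih]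
    rw [PySem.Dict.contains_insert]
    simp [Bool.or_assoc, Bool.or_left_comm]

theorem enumerate_shift (xs : List Char) : ∀ (s : Int),
    PySem.List.enumerate xs s = (PySem.List.enumerate xs 0).map (fun p => (p.1 + s, p.2)) := by
  induction xs with
  | nil => simp
  | cons x t ih =>
    intro s
    rw [PySem.List.enumerate_cons, PySem.List.enumerate_cons, ih (s+1)]
    have h01 : (0:Int) + 1 = 1 := by norm_num
    rw [h01, ih 1, List.map_cons, List.map_map]
    simp only [zero_add, List.cons.injEq, true_and]
    apply List.map_congr_left
    intro p _
    simp
    omega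

theorem chunks_items (n : Nat) : ∀ (rest : List Char), rest.length ≤ n → rest.Nodup →
    ∀ (s : Int) (m : PySem.Dict String Int),
    (∀ c ∈ rest, m.contains (String.ofList [c]) = false) →
    (getCharMapChunks m s rest).items
      = m.items ++ (PySem.List.enumerate rest 0).map
          (fun p => (String.ofList [p.2], min (s + PySem.Int.floordiv p.1 9 + 1) 3)) := by
  induction n with
  | zero =>
    intro rest hlen _ s m _
    have : rest = [] := List.length_eq_zero_iff.mp (Nat.le_zero.mp hlen)
    subst this
    rw [getCharMapChunks]
    simp
  | succ n ih =>
    intro rest hlen hnd s m hfresh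
    rw [getCharMapChunks]
    by_cases hre : rest = []
    · subst hre; simp
    · simp only [hre, dif_neg, not_false_iff]
      set s' := min (s + 1) 3 with hs'
      set m' := (rest.take 9).foldl (fun d ch => d.insert (String.ofList [ch]) s') m with hm'
      have htd : rest = rest.take 9 ++ rest.drop 9 := (List.take_append_drop 9 rest).symm
      have hndt : (rest.take 9).Nodup := hnd.sublist (List.take_sublist _ _)
      have hndd : (rest.drop 9).Nodup := hnd.sublist (List.drop_sublist _ _)
      have hdisj : ∀ c ∈ rest.drop 9, c ∉ rest.take 9 := by
        intro c hc
        intro hct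
        have h2 := htd ▸ hnd
        rw [List.nodup_append] at h2
        exact h2.2.2 c hct c hc rfl
      -- items of m'
      have hmi : m'.items = m.items ++ (rest.take 9).map (fun c => (String.ofList [c], s')) := by
        rw [hm']
        exact PySem.Dict.items_foldl_insert_fresh _ _ _ _
          (fun a ha => hfresh a (List.mem_of_mem_take ha))
          (hndt.map strOfSingle_inj)
      have hlen1 : 1 ≤ rest.length := by
        cases rest with
        | nil => exact absurd rfl hre
        | cons a t => simp
      have hlen' : (rest.drop 9).length ≤ n := by
        have hd : (rest.drop 9).length = rest.length - 9 := by simp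
        omega
      have hfresh' : ∀ c ∈ rest.drop 9, m'.contains (String.ofList [c]) = false := by
        intro c hc
        rw [hm', contains_foldl_insert]
        simp only [Bool.or_eq_false_iff]
        refine ⟨hfresh c (List.mem_of_mem_drop hc), ?_⟩
        simp only [List.any_eq_false, beq_iff_eq]
        intro a ha hEq
        exact hdisj c hc (strOfSingle_inj hEq ▸ ha)
      rw [ih _ hlen' hndd s' m' hfresh', hmi, List.append_assoc]
      congr 1
      conv_rhs => rw [htd]
      rw [PySem.List.enumerate_append, List.map_append]
      congr 1
      · -- the first chunk: indices below 9, floordiv _ 9 = 0, stroke s'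
        apply List.ext_getElem
        · simp [PySem.List.length_enumerate]
        · intro i h1 h2
          have hi9 : i < 9 := by
            have := h1
            simp at this
            omega
          rw [List.getElem_map, List.getElem_map, PySem.List.getElem_enumerate]
          have hfd : PySem.Int.floordiv ((0:Int) + (i:Int)) 9 = 0 := by
            rw [PySem.Int.floordiv_eq_ediv_of_pos (by norm_num)]
            omega
          simp only [List.getElem_take, hs']
          refine Prod.ext rfl ?_
          simp only [hfd]
          omega
      · -- the tail: shift the start of enumerate by the chunk length
        rw [enumerate_shift (rest.drop 9) ((0:Int) + ((rest.take 9).length : Int)), List.map_map]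
        apply List.map_congr_left
        intro p hp
        obtain ⟨k, hk, hpk⟩ := (PySem.List.mem_enumerate_iff _ _ _).mp hp
        have hdne : rest.drop 9 ≠ [] := by
          intro hnil
          rw [hnil] at hk
          simp at hk
        have ht9 : (rest.take 9).length = 9 := by
          rw [List.length_take]
          have : 9 < rest.length := by
            by_contra hge
            exact hdne (List.drop_eq_nil_of_le (by omega))
          omega
        subst hpk
        simp only [Function.comp, ht9, zero_add]
        have h9 : (0:Int) + (k:Int) + 9 = (k:Int) + 9 := by ring
        rw [PySem.Int.floordiv_eq_ediv_of_pos (by norm_num : (0:Int) < 9),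
            PySem.Int.floordiv_eq_ediv_of_pos (by norm_num : (0:Int) < 9)]
        simp only [Prod.mk.injEq, true_and]
        push_cast
        omega

-- ===== VERDICT (by name: the statement is the Claim_ definition above) =====
theorem getCharMap_spec : Claim_equal_getCharMap := by
  intro chars _
  unfold Spec_getCharMap getCharMap_alt
  rw [sort_eq_ofList, getCharMap_eq_rows]
  rw [chunks_items (PySem.Set.ofList chars.toList).length _ le_rfl
      (PySem.Set.nodup_ofList _) 0 _ (fun c _ => PySem.Dict.contains_empty _)]
  have hempty : (PySem.Dict.empty : PySem.Dict String Int).items = [] := rfl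
  rw [hempty, List.nil_append]
  apply List.map_congr_left
  intro p hp
  simp [getCharMapRow]
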